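-- pv_equiv track=rewrite | github.com/ParJai/Advent-of-Code-2023 | 2023 D7.py | compareHandsPart2
-- ===== SOURCE A (Python) =====
-- def compareHandsPart2(hand1, hand2):
--     ranks = 'J23456789TQKA'
--     type1, type2 = hand1[1], hand2[1]
--     cards1, cards2 = hand1[0], hand2[0]
--     if type1 > type2:
--         return 1
--     elif type1 < type2:
--         return -1
--     else:
--         for char in range(len(cards1)):
--             if ranks.index(cards1[char]) > ranks.index(cards2[char]):
--                 return 1
--             elif ranks.index(cards1[char]) < ranks.index(cards2[char]):
--                 return -1
--         return 0
-- ===== SOURCE B (Python) =====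
-- def compareHandsPart2(hand1, hand2):
--     ranks = 'J23456789TQKA'
--     if hand1[1] != hand2[1]:
--         return 1 if hand1[1] > hand2[1] else -1
--     v1 = 0
--     for c in hand1[0]:
--         v1 = v1 * 13 + ranks.index(c)
--     v2 = 0
--     for c in hand2[0]:
--         v2 = v2 * 13 + ranks.index(c)
--     return (v1 > v2) - (v1 < v2)
-- ===== Notes on version B (the rewrite author's own statement) =====
-- stated objective: alternative
-- what changed: B replaces A's per-position comparison loop with early exit by a numeric encoding: each hand's cards are Horner-folded into a single base-13 integer (rank digit per card) and B returns the sign of the difference of the two encodings, which agrees with lexicographic order for equal-length hands.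
-- outside the precondition, e.g. on compareHandsPart2(('QX', 0), ('2X', 0)): A returns 1, B raises ValueError; on compareHandsPart2(('A', 0), ('AK', 0)): A returns 0, B returns -1
import Mathlib
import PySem

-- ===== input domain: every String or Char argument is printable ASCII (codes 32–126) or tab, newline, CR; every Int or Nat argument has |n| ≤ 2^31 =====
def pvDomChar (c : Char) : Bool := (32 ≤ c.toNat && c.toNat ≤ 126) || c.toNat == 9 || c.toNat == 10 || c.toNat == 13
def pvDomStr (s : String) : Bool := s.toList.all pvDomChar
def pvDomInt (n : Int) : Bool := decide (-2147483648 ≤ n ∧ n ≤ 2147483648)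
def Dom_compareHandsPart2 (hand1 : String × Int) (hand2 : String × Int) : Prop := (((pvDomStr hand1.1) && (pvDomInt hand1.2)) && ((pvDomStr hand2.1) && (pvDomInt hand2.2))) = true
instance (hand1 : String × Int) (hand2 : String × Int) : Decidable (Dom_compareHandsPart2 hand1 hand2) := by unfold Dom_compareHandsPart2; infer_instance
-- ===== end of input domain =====

-- B replaces A's per-position index loop with early exit by Horner-encoding each hand into one
-- base-13 integer and returning the sign of the difference; objective: alternative (same cost).

-- ===== PORT A =====
-- ranks.index(c): ValueError (none) is excluded by Pre_; getD 0 is never reached inside Pre_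
def pvIdxA (c : Char) : Int :=
  ((PySem.List.index? "J23456789TQKA".toList c).getD 0 : Nat)

-- the 'for char in range(len(cards1))' loop of A
def pvLoopA (c1 c2 : List Char) : List Nat → Int
  | [] => 0
  | i :: rest =>
    -- cards2[char] can raise IndexError (none); excluded by Pre_, getD ' ' never reached there
    let a := pvIdxA ((PySem.List.pyGet? c1 (i : Int)).getD ' ')
    let b := pvIdxA ((PySem.List.pyGet? c2 (i : Int)).getD ' ')
    if a > b then 1 else if a < b then -1 else pvLoopA c1 c2 rest

def compareHandsPart2 (hand1 : String × Int) (hand2 : String × Int) : Int :=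
  let type1 := hand1.2
  let type2 := hand2.2
  let cards1 := hand1.1.toList
  let cards2 := hand2.1.toList
  if type1 > type2 then 1
  else if type1 < type2 then -1
  else pvLoopA cards1 cards2 (List.range cards1.length)

-- ===== PORT B =====
-- v = 0; for c in cards: v = v * 13 + ranks.index(c)   (ranks.index ported once above as pvIdxA)
def pvEnc (cs : List Char) : Int := cs.foldl (fun v c => v * 13 + pvIdxA c) 0

def compareHandsPart2_alt (hand1 : String × Int) (hand2 : String × Int) : Int :=
  if hand1.2 ≠ hand2.2 then (if hand1.2 > hand2.2 then 1 else -1)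
  else
    let v1 := pvEnc hand1.1.toList
    let v2 := pvEnc hand2.1.toList
    if v1 > v2 then 1 else if v1 < v2 then -1 else 0

-- ===== PRECONDITION & SPEC =====
-- Pre_ excludes, when the two hand types are equal, card strings of unequal length or containing a
-- character outside 'J23456789TQKA': there Python A raises (ValueError/IndexError) or returns a value
-- that depends on where its index loop happens to short-circuit, which B's whole-hand numeric
-- encoding does not reproduce (see the cites in claim.json).
def Pre_compareHandsPart2 (hand1 : String × Int) (hand2 : String × Int) : Prop :=
  hand1.2 ≠ hand2.2 ∨
    (hand1.1.toList.length = hand2.1.toList.length ∧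
     hand1.1.toList.all (fun c => "J23456789TQKA".toList.contains c) = true ∧
     hand2.1.toList.all (fun c => "J23456789TQKA".toList.contains c) = true)
instance (hand1 : String × Int) (hand2 : String × Int) : Decidable (Pre_compareHandsPart2 hand1 hand2) := by
  unfold Pre_compareHandsPart2; infer_instance

def pvWitness_compareHandsPart2 : (String × Int) × (String × Int) := (("KK677", 2), ("KTJJT", 2))

def Spec_compareHandsPart2 (hand1 : String × Int) (hand2 : String × Int) (out : Int) : Prop := out = compareHandsPart2_alt hand1 hand2
instance (hand1 : String × Int) (hand2 : String × Int) (out : Int) : Decidable (Spec_compareHandsPart2 hand1 hand2 out) := by unfold Spec_compareHandsPart2; infer_instance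

-- ===== CLAIM =====
def Claim_equal_compareHandsPart2 : Prop := ∀ (hand1 : String × Int) (hand2 : String × Int), Dom_compareHandsPart2 hand1 hand2 → Pre_compareHandsPart2 hand1 hand2 → Spec_compareHandsPart2 hand1 hand2 (compareHandsPart2 hand1 hand2)

-- ===== LEMMAS AND PROOFS =====

-- each ranks.index value is a digit in [0, 13)
theorem pvIdxA_bounds (c : Char) : 0 ≤ pvIdxA c ∧ pvIdxA c < 13 := by
  unfold pvIdxA
  cases h : PySem.List.index? "J23456789TQKA".toList c with
  | none => simp
  | some k =>
    obtain ⟨hk, -, -⟩ := PySem.List.getElem_of_index?_eq_some h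
    simp only [Option.getD_some]
    constructor
    · exact Int.natCast_nonneg k
    · exact_mod_cast hk

-- proof-only helper: lexicographic comparison of two digit lists (the value A's loop computes)
def pvLexCmp : List Int → List Int → Int
  | [], _ => 0
  | _ :: _, [] => 0
  | a :: as, b :: bs => if a > b then 1 else if a < b then -1 else pvLexCmp as bs

-- proof-only helper: Horner fold from an arbitrary accumulator
def pvHorner (acc : Int) : List Int → Int
  | [] => acc
  | d :: ds => pvHorner (acc * 13 + d) ds

theorem pvEnc_eq_horner (cs : List Char) : pvEnc cs = pvHorner 0 (cs.map pvIdxA) := by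
  unfold pvEnc
  rw [← List.foldl_map (f := pvIdxA) (g := fun v a => v * 13 + a)]
  generalize cs.map pvIdxA = ds
  show List.foldl (fun v a => v * 13 + a) 0 ds = pvHorner 0 ds
  generalize (0 : Int) = acc
  induction ds generalizing acc with
  | nil => rfl
  | cons d ds ih => simp [pvHorner, List.foldl, ih]

theorem pvHorner_shift (ds : List Int) (acc : Int) :
    pvHorner acc ds = acc * 13 ^ ds.length + pvHorner 0 ds := by
  induction ds generalizing acc with
  | nil => simp [pvHorner]
  | cons d ds ih =>
    simp only [pvHorner, List.length_cons, zero_mul, zero_add]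
    rw [ih (acc * 13 + d), ih d]
    ring

theorem pvHorner_bounds (ds : List Int) (h : ∀ d ∈ ds, 0 ≤ d ∧ d < 13) :
    0 ≤ pvHorner 0 ds ∧ pvHorner 0 ds < 13 ^ ds.length := by
  induction ds with
  | nil => simp [pvHorner]
  | cons d ds ih =>
    have hd := h d (by simp)
    have ih' := ih (fun x hx => h x (by simp [hx]))
    simp only [pvHorner, List.length_cons, zero_mul, zero_add]
    rw [pvHorner_shift ds d]
    have hpow : (0 : Int) < 13 ^ ds.length := by positivity
    constructor
    · nlinarith [ih'.1, hd.1]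
    · have : d * 13 ^ ds.length ≤ 12 * 13 ^ ds.length := by nlinarith [hd.2]
      calc d * 13 ^ ds.length + pvHorner 0 ds < d * 13 ^ ds.length + 13 ^ ds.length := by
            linarith [ih'.2]
        _ ≤ 13 * 13 ^ ds.length := by nlinarith [hd.2]
        _ = 13 ^ (ds.length + 1) := by ring

-- lexicographic comparison of equal-length digit lists equals the sign of the Horner difference
theorem pvLexCmp_eq_sign (ds1 ds2 : List Int) (hlen : ds1.length = ds2.length)
    (h1 : ∀ d ∈ ds1, 0 ≤ d ∧ d < 13) (h2 : ∀ d ∈ ds2, 0 ≤ d ∧ d < 13) :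
    pvLexCmp ds1 ds2 =
      (if pvHorner 0 ds1 > pvHorner 0 ds2 then 1
       else if pvHorner 0 ds1 < pvHorner 0 ds2 then -1 else 0) := by
  induction ds1 generalizing ds2 with
  | nil =>
    cases ds2 with
    | nil => simp [pvLexCmp]
    | cons b bs => simp at hlen
  | cons a as ih =>
    cases ds2 with
    | nil => simp at hlen
    | cons b bs =>
      have hlen' : as.length = bs.length := by simpa using hlen
      have ha := h1 a (by simp)
      have hb := h2 b (by simp)
      have hbas := pvHorner_bounds as (fun x hx => h1 x (by simp [hx]))
      have hbbs := pvHorner_bounds bs (fun x hx => h2 x (by simp [hx]))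
      simp only [pvLexCmp, pvHorner, zero_mul, zero_add]
      rw [pvHorner_shift as a, pvHorner_shift bs b, hlen']
      have hpow : (0 : Int) < 13 ^ bs.length := by positivity
      rcases lt_trichotomy a b with hab | hab | hab
      · have hlt : a * 13 ^ bs.length + pvHorner 0 as <
            b * 13 ^ bs.length + pvHorner 0 bs := by
          have : a * 13 ^ bs.length + 13 ^ bs.length ≤ b * 13 ^ bs.length := by nlinarith
          have hle : pvHorner 0 as < 13 ^ bs.length := hlen' ▸ hbas.2
          linarith [hbbs.1]
        rw [if_neg (by omega : ¬ a > b), if_pos hab, if_neg (asymm hlt), if_pos hlt]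
      · subst hab
        rw [if_neg (by omega), if_neg (by omega),
          ih bs hlen' (fun x hx => h1 x (by simp [hx])) (fun x hx => h2 x (by simp [hx]))]
        simp only [gt_iff_lt, add_lt_add_iff_left]
      · have hgt : a * 13 ^ bs.length + pvHorner 0 as >
            b * 13 ^ bs.length + pvHorner 0 bs := by
          have : b * 13 ^ bs.length + 13 ^ bs.length ≤ a * 13 ^ bs.length := by nlinarith
          linarith [hbbs.2, hbas.1]
        rw [if_pos hab, if_pos hgt]

-- A's loop over range' k n equals lexicographic comparison of the mapped suffixes from k
theorem pvLoopA_eq_lex (c1 c2 : List Char) (hlen : c1.length = c2.length) :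
    ∀ n k, k + n = c1.length →
      pvLoopA c1 c2 (List.range' k n) =
        pvLexCmp ((c1.drop k).map pvIdxA) ((c2.drop k).map pvIdxA) := by
  intro n
  induction n with
  | zero =>
    intro k hk
    have h1 : c1.drop k = [] := List.drop_eq_nil_of_le (by omega)
    have h2 : c2.drop k = [] := List.drop_eq_nil_of_le (by omega)
    simp [pvLoopA, h1, h2, pvLexCmp]
  | succ n ih =>
    intro k hk
    have hk1 : k < c1.length := by omega
    have hk2 : k < c2.length := by omega
    have hd1 : c1.drop k = c1[k] :: c1.drop (k + 1) := List.drop_eq_getElem_cons hk1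
    have hd2 : c2.drop k = c2[k] :: c2.drop (k + 1) := List.drop_eq_getElem_cons hk2
    have hg1 : PySem.List.pyGet? c1 (k : Int) = some c1[k] := by
      simp [hk1]
    have hg2 : PySem.List.pyGet? c2 (k : Int) = some c2[k] := by
      simp [hk2]
    rw [List.range'_succ]
    simp only [pvLoopA, hg1, hg2, Option.getD_some, hd1, hd2, List.map_cons, pvLexCmp]
    split_ifs <;> first | rfl | exact ih (k + 1) (by omega)

-- ===== VERDICT =====
theorem compareHandsPart2_spec : Claim_equal_compareHandsPart2 := by
  intro hand1 hand2 _ hpre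
  unfold Spec_compareHandsPart2 compareHandsPart2 compareHandsPart2_alt
  by_cases hgt : hand1.2 > hand2.2
  · simp [hgt, ne_of_gt hgt]
  · by_cases hlt : hand1.2 < hand2.2
    · simp [hgt, hlt, ne_of_lt hlt]
    · have heq : hand1.2 = hand2.2 := le_antisymm (not_lt.mp hgt) (not_lt.mp hlt)
      have hlen : hand1.1.toList.length = hand2.1.toList.length := by
        rcases hpre with h | h
        · exact absurd heq h
        · exact h.1
      have hrange : List.range hand1.1.toList.length =
          List.range' 0 hand1.1.toList.length := List.range_eq_range'
      rw [if_neg hgt, if_neg hlt, if_neg (by simp [heq]), hrange,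
        pvLoopA_eq_lex _ _ hlen _ 0 (by omega)]
      simp only [List.drop_zero]
      rw [pvLexCmp_eq_sign _ _ (by simpa using hlen)
        (by intro d hd; obtain ⟨c, -, rfl⟩ := List.mem_map.mp hd; exact pvIdxA_bounds c)
        (by intro d hd; obtain ⟨c, -, rfl⟩ := List.mem_map.mp hd; exact pvIdxA_bounds c)]
      rw [pvEnc_eq_horner, pvEnc_eq_horner]
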